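-- pv_equiv track=rewrite | github.com/pypi-data/pypi-mirror-34 | packages/pynets/pynets-0.6.20-py2.py3-none-any.whl/pynets/utils.py | create_net_list
-- ===== SOURCE A (Python) =====
-- def create_net_list(node_size_list, network, network_list, multi_thr, iter_thresh, conn_model_list):
--     if conn_model_list:
--         for cm in range(len(conn_model_list)):
--             if node_size_list:
--                 for ns in range(len(node_size_list)):
--                     if multi_thr is True:
--                         for t in range(len(iter_thresh)):
--                             network_list.append(network)
--                     else:
--                         network_list.append(network)
--             else:
--                 if multi_thr is True:
--                     for t in range(len(iter_thresh)):
--                         network_list.append(network)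
--                 else:
--                     network_list.append(network)
--     else:
--         if node_size_list:
--             for ns in range(len(node_size_list)):
--                 if multi_thr is True:
--                     for t in range(len(iter_thresh)):
--                         network_list.append(network)
--                 else:
--                     network_list.append(network)
--         else:
--             if multi_thr is True:
--                 for t in range(len(iter_thresh)):
--                     network_list.append(network)
--             else:
--                 network_list.append(network)
--     return network_list
-- ===== SOURCE B (Python) =====
-- def create_net_list(node_size_list, network, network_list, multi_thr, iter_thresh, conn_model_list):
--     cm = len(conn_model_list) if conn_model_list else 1
--     ns = len(node_size_list) if node_size_list else 1
--     th = len(iter_thresh) if multi_thr is True else 1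
--     network_list.extend([network] * (cm * ns * th))
--     return network_list
-- ===== Notes on version B (the rewrite author's own statement) =====
-- stated objective: simpler
-- what changed: Replaces the four-way nested loop/branch structure with one closed-form product of the three repetition factors and a single extend of [network] * (cm*ns*th).
import Mathlib
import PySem

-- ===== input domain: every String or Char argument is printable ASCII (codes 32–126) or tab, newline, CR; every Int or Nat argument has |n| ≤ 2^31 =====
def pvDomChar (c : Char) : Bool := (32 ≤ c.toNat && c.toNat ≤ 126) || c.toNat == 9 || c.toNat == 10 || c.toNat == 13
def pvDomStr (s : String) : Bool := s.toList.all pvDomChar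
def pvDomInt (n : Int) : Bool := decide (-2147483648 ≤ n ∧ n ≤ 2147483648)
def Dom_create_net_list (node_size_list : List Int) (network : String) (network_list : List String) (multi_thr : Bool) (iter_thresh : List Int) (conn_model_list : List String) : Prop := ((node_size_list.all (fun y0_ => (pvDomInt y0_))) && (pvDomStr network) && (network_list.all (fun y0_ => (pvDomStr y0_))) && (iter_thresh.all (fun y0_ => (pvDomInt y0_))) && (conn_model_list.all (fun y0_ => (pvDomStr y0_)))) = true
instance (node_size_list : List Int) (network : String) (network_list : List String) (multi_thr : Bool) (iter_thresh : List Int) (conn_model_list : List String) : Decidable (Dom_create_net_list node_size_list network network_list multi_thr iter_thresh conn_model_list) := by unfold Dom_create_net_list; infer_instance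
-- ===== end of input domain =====

-- ===== PORT A =====
-- B replaces A's nested loops/branches by a single product of three factors and one extend (same return value; A mutates network_list in place, B does too in Python; equivalence here is about the return value).
def create_net_list (node_size_list : List Int) (network : String) (network_list : List String) (multi_thr : Bool) (iter_thresh : List Int) (conn_model_list : List String) : List String :=
  if conn_model_list ≠ [] then
    (PySem.List.pyRange 0 (conn_model_list.length : Int) 1).foldl (fun nl _cm =>
      if node_size_list ≠ [] then
        (PySem.List.pyRange 0 (node_size_list.length : Int) 1).foldl (fun nl2 _ns =>
          if multi_thr = true then
            (PySem.List.pyRange 0 (iter_thresh.length : Int) 1).foldl (fun nl3 _t => nl3 ++ [network]) nl2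
          else
            nl2 ++ [network]) nl
      else
        if multi_thr = true then
          (PySem.List.pyRange 0 (iter_thresh.length : Int) 1).foldl (fun nl3 _t => nl3 ++ [network]) nl
        else
          nl ++ [network]) network_list
  else
    if node_size_list ≠ [] then
      (PySem.List.pyRange 0 (node_size_list.length : Int) 1).foldl (fun nl2 _ns =>
        if multi_thr = true then
          (PySem.List.pyRange 0 (iter_thresh.length : Int) 1).foldl (fun nl3 _t => nl3 ++ [network]) nl2
        else
          nl2 ++ [network]) network_list
    else
      if multi_thr = true then
        (PySem.List.pyRange 0 (iter_thresh.length : Int) 1).foldl (fun nl3 _t => nl3 ++ [network]) network_list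
      else
        network_list ++ [network]

-- ===== PORT B =====
def create_net_list_alt (node_size_list : List Int) (network : String) (network_list : List String) (multi_thr : Bool) (iter_thresh : List Int) (conn_model_list : List String) : List String :=
  let cm := if conn_model_list ≠ [] then conn_model_list.length else 1
  let ns := if node_size_list ≠ [] then node_size_list.length else 1
  let th := if multi_thr = true then iter_thresh.length else 1
  network_list ++ List.replicate (cm * ns * th) network

-- ===== PRECONDITION & SPEC =====
def Spec_create_net_list (node_size_list : List Int) (network : String) (network_list : List String) (multi_thr : Bool) (iter_thresh : List Int) (conn_model_list : List String) (out : List String) : Prop := out = create_net_list_alt node_size_list network network_list multi_thr iter_thresh conn_model_list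
instance (node_size_list : List Int) (network : String) (network_list : List String) (multi_thr : Bool) (iter_thresh : List Int) (conn_model_list : List String) (out : List String) : Decidable (Spec_create_net_list node_size_list network network_list multi_thr iter_thresh conn_model_list out) := by unfold Spec_create_net_list; infer_instance

-- ===== CLAIM (what is proved, stated in full; the proofs are below) =====
def Claim_equal_create_net_list : Prop := ∀ (node_size_list : List Int) (network : String) (network_list : List String) (multi_thr : Bool) (iter_thresh : List Int) (conn_model_list : List String), Dom_create_net_list node_size_list network network_list multi_thr iter_thresh conn_model_list → Spec_create_net_list node_size_list network network_list multi_thr iter_thresh conn_model_list (create_net_list node_size_list network network_list multi_thr iter_thresh conn_model_list)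

-- ===== LEMMAS AND PROOFS =====

-- ===== VERDICT (by name: the statement is the Claim_ definition above) =====
-- each loop pass appends a fixed block of k copies; the whole fold appends length*k copies
theorem foldl_app_rep {α β : Type} (x : β) (k : Nat) :
    ∀ (l : List α) (acc : List β),
      l.foldl (fun a _ => a ++ List.replicate k x) acc = acc ++ List.replicate (l.length * k) x := by
  intro l
  induction l with
  | nil => intro acc; simp
  | cons h t ih =>
      intro acc
      simp only [List.foldl_cons, ih, List.length_cons]
      rw [Nat.succ_mul, Nat.add_comm, List.replicate_add, List.append_assoc]

theorem foldl_app_one {α β : Type} (x : β) (l : List α) (acc : List β) :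
    l.foldl (fun a _ => a ++ [x]) acc = acc ++ List.replicate l.length x := by
  have := foldl_app_rep x 1 l acc
  simpa using this

theorem create_net_list_spec : Claim_equal_create_net_list := by
  intro nsl net nl mt it cml _
  unfold Spec_create_net_list create_net_list create_net_list_alt
  split_ifs with h1 h2 h3 h3 h2 h3 h3 <;>
    simp [foldl_app_one, foldl_app_rep, PySem.List.length_pyRange_one] <;> ring_nf
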